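-- pv_equiv track=rewrite | github.com/jonathan132c/geospatial-monitoring-system | scripts/repair_dataset_integrity.py | external_from_checks
-- ===== SOURCE A (Python) =====
-- from typing import Any, Dict, Iterable, List, Tuple
--
-- def external_from_checks(checks: List[Dict[str, Any]]) -> Tuple[str, str]:
--     if any(check['matchType'] == 'exact_match' for check in checks):
--         return 'completed', 'exact_match'
--     if any(check['matchType'] == 'partial_match' for check in checks):
--         return 'completed', 'partial_match'
--     if any(check['matchType'] == 'context_only' for check in checks):
--         return 'completed', 'context_only'
--     return 'completed', 'no_match'
-- ===== SOURCE B (Python) =====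
-- from typing import Any, Dict, List, Tuple
--
-- def external_from_checks(checks: List[Dict[str, Any]]) -> Tuple[str, str]:
--     saw_partial = False
--     saw_context = False
--     for check in checks:
--         mt = check['matchType']
--         if mt == 'exact_match':
--             return 'completed', 'exact_match'
--         if mt == 'partial_match':
--             saw_partial = True
--         elif mt == 'context_only':
--             saw_context = True
--     if saw_partial:
--         return 'completed', 'partial_match'
--     if saw_context:
--         return 'completed', 'context_only'
--     return 'completed', 'no_match'
-- ===== Notes on version B (the rewrite author's own statement) =====
-- stated objective: alternative
-- what changed: Replaces A's three short-circuiting any() scans over the list with a single pass that returns on exact_match and maintains saw_partial/saw_context flags for the final verdict.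
import Mathlib
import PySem

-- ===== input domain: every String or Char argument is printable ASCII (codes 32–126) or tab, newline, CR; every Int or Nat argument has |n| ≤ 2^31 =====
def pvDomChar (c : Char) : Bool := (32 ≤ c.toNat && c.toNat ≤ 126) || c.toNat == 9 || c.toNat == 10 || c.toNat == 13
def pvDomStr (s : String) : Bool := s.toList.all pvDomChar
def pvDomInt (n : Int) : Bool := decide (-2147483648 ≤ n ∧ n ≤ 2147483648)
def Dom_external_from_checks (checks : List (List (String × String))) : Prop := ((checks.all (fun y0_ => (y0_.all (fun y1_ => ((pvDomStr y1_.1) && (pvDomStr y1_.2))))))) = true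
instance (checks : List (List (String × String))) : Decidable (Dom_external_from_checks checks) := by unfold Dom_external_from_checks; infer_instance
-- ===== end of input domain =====

-- B replaces A's three short-circuiting any() scans with one pass keeping saw_partial/saw_context flags (alternative decomposition, same cost).


-- ===== PORT A =====
-- three any(...) generators over checks, then the fallback; check['matchType'] is Dict.get? (none exactly where Python raises KeyError — excluded by Pre_)
def external_from_checks (checks : List (List (String × String))) : String × String :=
  if checks.any (fun check => (PySem.Dict.mk check).get? "matchType" == some "exact_match") then
    ("completed", "exact_match")
  else if checks.any (fun check => (PySem.Dict.mk check).get? "matchType" == some "partial_match") then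
    ("completed", "partial_match")
  else if checks.any (fun check => (PySem.Dict.mk check).get? "matchType" == some "context_only") then
    ("completed", "context_only")
  else
    ("completed", "no_match")

-- ===== PORT B =====
-- single loop with saw_partial / saw_context accumulators; returns mid-loop on exact_match
def extAltLoop (checks : List (List (String × String))) (sawPartial sawContext : Bool) : String × String :=
  match checks with
  | [] =>
      if sawPartial then ("completed", "partial_match")
      else if sawContext then ("completed", "context_only")
      else ("completed", "no_match")
  | check :: rest =>
      let mt := (PySem.Dict.mk check).get? "matchType"
      if mt == some "exact_match" then ("completed", "exact_match")
      else extAltLoop rest (sawPartial || (mt == some "partial_match"))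
                           (sawContext || (mt == some "context_only"))

def external_from_checks_alt (checks : List (List (String × String))) : String × String :=
  extAltLoop checks false false

-- ===== PRECONDITION & SPEC =====
-- Pre_ excludes exactly the inputs where Python A raises KeyError: a check missing the
-- 'matchType' key that occurs before any exact_match check (A's first scan hits it).
def Pre_external_from_checks (checks : List (List (String × String))) : Prop :=
  ∀ c ∈ checks.takeWhile
      (fun check => !((PySem.Dict.mk check).get? "matchType" == some "exact_match")),
    ((PySem.Dict.mk c).get? "matchType").isSome
instance (checks : List (List (String × String))) : Decidable (Pre_external_from_checks checks) := by unfold Pre_external_from_checks; infer_instance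

def pvWitness_external_from_checks : (List (List (String × String))) :=
  [[("matchType", "partial_match")], [("matchType", "context_only")]]

def Spec_external_from_checks (checks : List (List (String × String))) (out : String × String) : Prop := out = external_from_checks_alt checks
instance (checks : List (List (String × String))) (out : String × String) : Decidable (Spec_external_from_checks checks out) := by unfold Spec_external_from_checks; infer_instance

-- ===== CLAIM (what is proved, stated in full; the proofs are below) =====
def Claim_equal_external_from_checks : Prop := ∀ (checks : List (List (String × String))), Dom_external_from_checks checks → Pre_external_from_checks checks → Spec_external_from_checks checks (external_from_checks checks)

-- ===== LEMMAS AND PROOFS =====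

-- characterisation of B's loop in terms of the three membership scans A performs
theorem extAltLoop_eq (checks : List (List (String × String))) (sawPartial sawContext : Bool) :
    extAltLoop checks sawPartial sawContext =
      if checks.any (fun check => (PySem.Dict.mk check).get? "matchType" == some "exact_match") then
        ("completed", "exact_match")
      else if sawPartial || checks.any (fun check => (PySem.Dict.mk check).get? "matchType" == some "partial_match") then
        ("completed", "partial_match")
      else if sawContext || checks.any (fun check => (PySem.Dict.mk check).get? "matchType" == some "context_only") then
        ("completed", "context_only")
      else
        ("completed", "no_match") := by
  induction checks generalizing sawPartial sawContext with
  | nil => simp [extAltLoop]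
  | cons c rest ih =>
      simp only [extAltLoop, List.any_cons]
      by_cases h : ((PySem.Dict.mk c).get? "matchType" == some "exact_match") = true
      · simp [h]
      · simp only [Bool.not_eq_true] at h
        rw [ih]
        simp [h, Bool.or_assoc]

-- ===== VERDICT (by name: the statement is the Claim_ definition above) =====
theorem external_from_checks_spec : Claim_equal_external_from_checks := by
  intro checks _ _
  unfold Spec_external_from_checks external_from_checks external_from_checks_alt
  rw [extAltLoop_eq]
  simp
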